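-- pv_equiv track=rewrite | github.com/ar-bansal/dsc-261-detect-gpt-evaluation | run.py | extract_fills
-- ===== SOURCE A (Python) =====
-- def extract_fills(texts):
--     extracted = []
--     for txt in texts:
--         fills = []
--         # Split on <mask>
--         pieces = txt.split("<mask>")
--         for p in pieces[1:]:  # each following piece begins with the fill
--             # stop at end of fill
--             end = p.find("</s>")
--             if end == -1:
--                 end = len(p)
--             fills.append(p[:end].strip())
--         extracted.append(fills)
--     return extracted
-- ===== SOURCE B (Python) =====
-- def _fills_from(txt, i):
--     # i is the index of a "<mask>" occurrence in txt
--     fills = []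
--     while True:
--         start = i + 6
--         nxt = txt.find("<mask>", start)
--         limit = len(txt) if nxt == -1 else nxt
--         stop = txt.find("</s>", start, limit)
--         end = limit if stop == -1 else stop
--         fills.append(txt[start:end].strip())
--         if nxt == -1:
--             return fills
--         i = nxt
--
--
-- def extract_fills(texts):
--     out = []
--     for txt in texts:
--         i = txt.find("<mask>")
--         out.append([] if i == -1 else _fills_from(txt, i))
--     return out
-- ===== Notes on version B (the rewrite author's own statement) =====
-- stated objective: alternative
-- what changed: A splits each text into a materialized piece list with str.split and post-processes each piece; B makes a single left-to-right index scan with bounded str.find calls, emitting each fill directly without building the piece list.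
import Mathlib
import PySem

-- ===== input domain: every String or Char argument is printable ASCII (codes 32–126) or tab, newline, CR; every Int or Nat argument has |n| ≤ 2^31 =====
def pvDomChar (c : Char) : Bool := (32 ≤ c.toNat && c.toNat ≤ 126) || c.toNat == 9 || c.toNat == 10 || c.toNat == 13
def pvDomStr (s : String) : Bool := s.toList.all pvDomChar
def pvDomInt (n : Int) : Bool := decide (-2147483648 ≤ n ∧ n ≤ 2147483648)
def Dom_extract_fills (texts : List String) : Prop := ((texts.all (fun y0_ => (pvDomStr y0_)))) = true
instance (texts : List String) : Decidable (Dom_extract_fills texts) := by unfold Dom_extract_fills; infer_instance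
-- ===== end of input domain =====

-- B replaces A's split-into-pieces pass by a single index scan with find (no intermediate piece list); same return value, alternative structure.

-- ===== PORT A =====
-- inner loop of A for one text: split on "<mask>", then for each later piece cut at "</s>" and strip
def fillsA (s : List Char) : List String :=
  let pieces := PySem.Chars.splitOn s "<mask>".toList
  (PySem.List.slice pieces (some 1) none).foldl
    (fun fills p =>
      let e := PySem.Chars.find p "</s>".toList
      let e := if e = -1 then PySem.Chars.len p else e
      fills ++ [String.ofList (PySem.Chars.strip (PySem.List.slice p none (some e)))])
    []

def extract_fills (texts : List String) : List (List String) :=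
  texts.foldl (fun extracted txt => extracted ++ [fillsA txt.toList]) []

-- ===== PORT B =====
-- termination fact for the scan loop: a successful find from position k lands in [k, length]
lemma pvFindFromBounds (s sub : List Char) (k : Nat)
    (h : ¬ PySem.Chars.findFrom s sub (k : Int) none = -1) :
    (k : Int) ≤ PySem.Chars.findFrom s sub (k : Int) none ∧
      PySem.Chars.findFrom s sub (k : Int) none ≤ (s.length : Int) := by
  by_cases hk : k ≤ s.length
  · rw [PySem.Chars.findFrom_natCast s sub k hk] at h ⊢
    have h1 := PySem.Chars.find_le_length (s.drop k) sub
    have h2 := PySem.Chars.neg_one_le_find (s.drop k) sub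
    simp only [List.length_drop] at h1
    split_ifs at h ⊢ with hc
    · exact absurd rfl h
    · constructor <;> omega
  · exfalso
    apply h
    simp only [PySem.Chars.findFrom]
    rw [if_pos]
    omega

-- the while-loop of B's _fills_from: i is the index of a "<mask>" occurrence
def bloopFills (s : List Char) (i : Nat) : List String :=
  let start : Int := (i : Int) + 6
  let nxt := PySem.Chars.findFrom s "<mask>".toList start none
  let limit := if nxt = -1 then (s.length : Int) else nxt
  let stop := PySem.Chars.findFrom s "</s>".toList start (some limit)
  let e := if stop = -1 then limit else stop
  let fill := String.ofList (PySem.Chars.strip (PySem.List.slice s (some start) (some e)))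
  if _h : nxt = -1 then [fill] else fill :: bloopFills s nxt.toNat
termination_by s.length - i
decreasing_by
  have hc : ((i + 6 : Nat) : Int) = (i : Int) + 6 := by push_cast; ring
  have hb := pvFindFromBounds s "<mask>".toList (i + 6) (by rw [hc]; exact _h)
  rw [hc] at hb
  omega

def extract_fills_alt (texts : List String) : List (List String) :=
  texts.foldl
    (fun out txt =>
      let i := PySem.Chars.find txt.toList "<mask>".toList
      out ++ [if i = -1 then [] else bloopFills txt.toList i.toNat])
    []

-- ===== PRECONDITION & SPEC =====
def Spec_extract_fills (texts : List String) (out : List (List String)) : Prop := out = extract_fills_alt texts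
instance (texts : List String) (out : List (List String)) : Decidable (Spec_extract_fills texts out) := by unfold Spec_extract_fills; infer_instance

-- ===== CLAIM (what is proved, stated in full; the proofs are below) =====
def Claim_equal_extract_fills : Prop := ∀ (texts : List String), Dom_extract_fills texts → Spec_extract_fills texts (extract_fills texts)

-- ===== LEMMAS AND PROOFS =====

-- reference recursion: the pieces of s split on "<mask>", phrased with find (proof-side only)
def piecesF (s : List Char) : List (List Char) :=
  let m := PySem.Chars.find s "<mask>".toList
  if hm : m = -1 then [s] else s.take m.toNat :: piecesF (s.drop (m.toNat + 6))
termination_by s.length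
decreasing_by
  have hinf : "<mask>".toList <:+: s :=
    (PySem.Chars.find_ne_neg_one_iff s "<mask>".toList).mp hm
  have h6 : ("<mask>".toList).length ≤ s.length := hinf.length_le
  simp only [List.length_drop]
  simp only [show ("<mask>".toList).length = 6 from by decide] at h6
  omega

-- A's per-piece transform
def cutA (p : List Char) : String :=
  String.ofList (PySem.Chars.strip (PySem.List.slice p none (some
    (if PySem.Chars.find p "</s>".toList = -1 then PySem.Chars.len p
     else PySem.Chars.find p "</s>".toList))))

lemma pvFindZero (s sub : List Char) (hp : sub <+: s) : PySem.Chars.find s sub = 0 := by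
  have h0 : 0 ≤ PySem.Chars.find s sub := (PySem.Chars.find_nonneg_iff s sub).mpr hp.isInfix
  have hsp := PySem.Chars.find_spec h0
  by_contra hne
  exact hsp.2 0 (by omega) (by simpa using hp)

lemma pvFindCons (c : Char) (rest sub : List Char) (hp : ¬ sub <+: (c :: rest)) :
    PySem.Chars.find (c :: rest) sub =
      if PySem.Chars.find rest sub = -1 then -1 else PySem.Chars.find rest sub + 1 := by
  split_ifs with hm
  · rw [PySem.Chars.find_eq_neg_one_iff]
    intro hinf
    obtain ⟨j, hj⟩ := (PySem.Chars.exists_prefix_drop_iff_isIn sub (c :: rest)).mpr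
      ((PySem.Chars.isIn_iff_infix _ _).mpr hinf)
    cases j with
    | zero => exact hp (by simpa using hj)
    | succ j' =>
      have hj' : sub <+: rest.drop j' := by simpa using hj
      exact (PySem.Chars.find_eq_neg_one_iff rest sub).mp hm
        (hj'.isInfix.trans (List.drop_suffix _ _).isInfix)
  · have h0r : 0 ≤ PySem.Chars.find rest sub := by
      have := PySem.Chars.neg_one_le_find rest sub; omega
    have hspr := PySem.Chars.find_spec h0r
    have hocc : sub <+: (c :: rest).drop ((PySem.Chars.find rest sub).toNat + 1) := by
      simpa using hspr.1
    have hinf : sub <:+: (c :: rest) := hocc.isInfix.trans (List.drop_suffix _ _).isInfix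
    have h0 : 0 ≤ PySem.Chars.find (c :: rest) sub := (PySem.Chars.find_nonneg_iff _ _).mpr hinf
    have hsp := PySem.Chars.find_spec h0
    have hFne : (PySem.Chars.find (c :: rest) sub).toNat ≠ 0 := by
      intro h0'
      apply hp
      have := hsp.1
      rw [h0'] at this
      simpa using this
    have hle : (PySem.Chars.find (c :: rest) sub).toNat ≤ (PySem.Chars.find rest sub).toNat + 1 := by
      by_contra hgt
      exact (hsp.2 ((PySem.Chars.find rest sub).toNat + 1) (by omega)) hocc
    have hoccF : sub <+: rest.drop ((PySem.Chars.find (c :: rest) sub).toNat - 1) := by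
      have h1 := hsp.1
      obtain ⟨t, ht⟩ : ∃ t, (PySem.Chars.find (c :: rest) sub).toNat = t + 1 :=
        ⟨(PySem.Chars.find (c :: rest) sub).toNat - 1, by omega⟩
      rw [ht] at h1
      simpa [ht] using h1
    have hge : (PySem.Chars.find rest sub).toNat ≤ (PySem.Chars.find (c :: rest) sub).toNat - 1 := by
      by_contra hlt
      exact hspr.2 ((PySem.Chars.find (c :: rest) sub).toNat - 1) (by omega) hoccF
    omega

lemma pvGoSpec (fuel : Nat) (l cur : List Char) (acc : List (List Char)) (hf : l.length < fuel) :
    PySem.Chars.splitOn.go "<mask>".toList fuel l cur acc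
      = acc.reverse ++ (piecesF l).modifyHead (fun p => cur.reverse ++ p) := by
  induction fuel generalizing l cur acc with
  | zero => omega
  | succ f ih =>
    match l with
    | [] =>
      rw [PySem.Chars.splitOn.go.eq_def, piecesF.eq_def]
      rw [dif_pos (by decide)]
      simp
    | c :: rest =>
      rw [PySem.Chars.splitOn.go.eq_def]
      simp only []
      by_cases hpre : ("<mask>".toList).isPrefixOf (c :: rest) = true
      · rw [if_pos hpre]
        rw [ih _ _ _ (by simp at hf ⊢; omega)]
        have hfind : PySem.Chars.find (c :: rest) "<mask>".toList = 0 :=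
          pvFindZero _ _ (List.isPrefixOf_iff_prefix.mp hpre)
        conv_rhs => rw [piecesF.eq_def]
        rw [dif_neg (by rw [hfind]; decide), hfind]
        simp only [List.modifyHead, Int.toNat_zero, List.take_zero, Nat.zero_add,
          List.drop_succ_cons, List.reverse_nil, List.nil_append, List.reverse_cons,
          List.append_assoc, List.singleton_append]
        rcases hX : piecesF (List.drop 5 rest) with _ | ⟨a, t⟩ <;> simp [hX]
      · rw [if_neg hpre]
        rw [ih _ _ _ (by simp at hf ⊢; omega)]
        have hnp : ¬ "<mask>".toList <+: (c :: rest) := fun h => hpre (List.isPrefixOf_iff_prefix.mpr h)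
        have hfc := pvFindCons c rest "<mask>".toList hnp
        by_cases hm : PySem.Chars.find rest "<mask>".toList = -1
        · conv_rhs => rw [piecesF.eq_def]
          rw [dif_pos (by rw [hfc, if_pos hm])]
          conv_lhs => rw [piecesF.eq_def]
          rw [dif_pos hm]
          simp [List.modifyHead]
        · have h0r : 0 ≤ PySem.Chars.find rest "<mask>".toList := by
            have := PySem.Chars.neg_one_le_find rest "<mask>".toList; omega
          conv_rhs => rw [piecesF.eq_def]
          rw [dif_neg (by rw [hfc, if_neg hm]; omega)]
          conv_lhs => rw [piecesF.eq_def]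
          rw [dif_neg hm, hfc]
          simp only [if_neg hm]
          have htn : (PySem.Chars.find rest "<mask>".toList + 1).toNat
              = (PySem.Chars.find rest "<mask>".toList).toNat + 1 := by omega
          have h7 : (PySem.Chars.find rest "<mask>".toList).toNat + 1 + 6
              = ((PySem.Chars.find rest "<mask>".toList).toNat + 6) + 1 := by omega
          rw [htn, h7]
          simp [List.modifyHead]

lemma pvSplitOnEq (s : List Char) :
    PySem.Chars.splitOn s "<mask>".toList = piecesF s := by
  unfold PySem.Chars.splitOn
  rw [pvGoSpec _ _ _ _ (by omega)]
  rcases hX : piecesF s with _ | ⟨a, t⟩ <;> simp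

lemma pvFindFromLen (s sub : List Char) (k : Int) :
    PySem.Chars.findFrom s sub k (some (s.length : Int)) = PySem.Chars.findFrom s sub k none := by
  simp [PySem.Chars.findFrom, show ¬((s.length : Int) < 0) from by omega]

lemma pvFindFromSome (s sub : List Char) (k e : Nat) (hke : k ≤ e) (hel : e ≤ s.length) :
    PySem.Chars.findFrom s sub (k : Int) (some (e : Int)) =
      (if PySem.Chars.find ((s.drop k).take (e - k)) sub = -1 then -1
       else (k : Int) + PySem.Chars.find ((s.drop k).take (e - k)) sub) := by
  simp only [PySem.Chars.findFrom,
    show ¬((s.length : Int) < (e : Int)) from by exact_mod_cast not_lt.mpr hel,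
    show ¬((e : Int) < 0) from by omega,
    show ¬((k : Int) < 0) from by omega,
    show ¬((e : Int) < (k : Int)) from by exact_mod_cast not_lt.mpr hke,
    if_false, Int.toNat_natCast, List.drop_take]

-- one unfolding of bloopFills, with the fill expression named
def pvFill (s : List Char) (i : Nat) : String :=
  String.ofList (PySem.Chars.strip (PySem.List.slice s (some ((i : Int) + 6)) (some
    (if PySem.Chars.findFrom s "</s>".toList ((i : Int) + 6)
          (some (if PySem.Chars.findFrom s "<mask>".toList ((i : Int) + 6) none = -1
                 then (s.length : Int)
                 else PySem.Chars.findFrom s "<mask>".toList ((i : Int) + 6) none)) = -1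
     then (if PySem.Chars.findFrom s "<mask>".toList ((i : Int) + 6) none = -1
           then (s.length : Int)
           else PySem.Chars.findFrom s "<mask>".toList ((i : Int) + 6) none)
     else PySem.Chars.findFrom s "</s>".toList ((i : Int) + 6)
          (some (if PySem.Chars.findFrom s "<mask>".toList ((i : Int) + 6) none = -1
                 then (s.length : Int)
                 else PySem.Chars.findFrom s "<mask>".toList ((i : Int) + 6) none))))))

lemma pvBloopStep (s : List Char) (i : Nat) :
    bloopFills s i =
      if PySem.Chars.findFrom s "<mask>".toList ((i : Int) + 6) none = -1 then [pvFill s i]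
      else pvFill s i ::
        bloopFills s (PySem.Chars.findFrom s "<mask>".toList ((i : Int) + 6) none).toNat := by
  rw [bloopFills.eq_def, pvFill]
  rfl

lemma pvCutANoSep (p : List Char) (hB : PySem.Chars.find p "</s>".toList = -1) :
    cutA p = String.ofList (PySem.Chars.strip p) := by
  show String.ofList (PySem.Chars.strip (PySem.List.slice p none (some
      (if PySem.Chars.find p "</s>".toList = -1 then PySem.Chars.len p
       else PySem.Chars.find p "</s>".toList)))) = _
  rw [if_pos hB, PySem.Chars.len_eq, PySem.List.slice_to _ (by omega), Int.toNat_natCast,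
    List.take_length]

lemma pvCutASep (p : List Char) (hB : ¬ PySem.Chars.find p "</s>".toList = -1) :
    cutA p
      = String.ofList (PySem.Chars.strip (p.take (PySem.Chars.find p "</s>".toList).toNat)) := by
  have h0B : 0 ≤ PySem.Chars.find p "</s>".toList := by
    have := PySem.Chars.neg_one_le_find p "</s>".toList; omega
  show String.ofList (PySem.Chars.strip (PySem.List.slice p none (some
      (if PySem.Chars.find p "</s>".toList = -1 then PySem.Chars.len p
       else PySem.Chars.find p "</s>".toList)))) = _
  rw [if_neg hB, PySem.List.slice_to _ (by omega)]

lemma pvFillNoMask (s : List Char) (i : Nat) (hlen : i + 6 ≤ s.length)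
    (hA : PySem.Chars.find (s.drop (i + 6)) "<mask>".toList = -1) :
    pvFill s i = cutA (s.drop (i + 6)) := by
  have hc6 : ((i : Int) + 6) = ((i + 6 : Nat) : Int) := by push_cast; ring
  rw [pvFill, hc6, PySem.Chars.findFrom_natCast s "<mask>".toList (i + 6) hlen]
  rw [if_pos hA, if_pos rfl, pvFindFromLen,
    PySem.Chars.findFrom_natCast s "</s>".toList (i + 6) hlen]
  by_cases hB : PySem.Chars.find (s.drop (i + 6)) "</s>".toList = -1
  · rw [if_pos hB, if_pos rfl, pvCutANoSep _ hB]
    rw [show ((s.length : Int)) = ((s.length : Nat) : Int) from rfl, PySem.List.slice_natCast]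
    rw [List.take_of_length_le (by simp)]
  · have h0B : 0 ≤ PySem.Chars.find (s.drop (i + 6)) "</s>".toList := by
      have := PySem.Chars.neg_one_le_find (s.drop (i + 6)) "</s>".toList; omega
    obtain ⟨r, hr⟩ := Int.eq_ofNat_of_zero_le h0B
    rw [hr]
    rw [if_neg (show ¬((r : Int) = -1) from by omega)]
    rw [if_neg (show ¬(((i + 6 : Nat) : Int) + (r : Int) = -1) from by omega)]
    rw [pvCutASep _ hB, hr, Int.toNat_natCast]
    rw [show ((i + 6 : Nat) : Int) + (r : Int) = (((i + 6) + r : Nat) : Int) from by push_cast; ring]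
    rw [PySem.List.slice_natCast, Nat.add_sub_cancel_left]

lemma pvFillMask (s : List Char) (i : Nat) (hlen : i + 6 ≤ s.length)
    (hA : ¬ PySem.Chars.find (s.drop (i + 6)) "<mask>".toList = -1)
    (hm6 : (PySem.Chars.find (s.drop (i + 6)) "<mask>".toList).toNat + 6
        ≤ (s.drop (i + 6)).length) :
    pvFill s i
      = cutA ((s.drop (i + 6)).take (PySem.Chars.find (s.drop (i + 6)) "<mask>".toList).toNat) := by
  have hc6 : ((i : Int) + 6) = ((i + 6 : Nat) : Int) := by push_cast; ring
  have hulen : (s.drop (i + 6)).length = s.length - (i + 6) := by simp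
  have h0A : 0 ≤ PySem.Chars.find (s.drop (i + 6)) "<mask>".toList := by
    have := PySem.Chars.neg_one_le_find (s.drop (i + 6)) "<mask>".toList; omega
  obtain ⟨m, hm⟩ := Int.eq_ofNat_of_zero_le h0A
  have hm6' : m + 6 ≤ (s.drop (i + 6)).length := by
    rw [hm, Int.toNat_natCast] at hm6; exact hm6
  have hql : ((s.drop (i + 6)).take m).length = m := by
    simp only [List.length_take]
    omega
  rw [pvFill, hc6, PySem.Chars.findFrom_natCast s "<mask>".toList (i + 6) hlen, hm,
    Int.toNat_natCast]
  rw [if_neg (show ¬((m : Int) = -1) from by omega)]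
  rw [if_neg (show ¬(((i + 6 : Nat) : Int) + (m : Int) = -1) from by omega)]
  rw [show ((i + 6 : Nat) : Int) + (m : Int) = (((i + 6) + m : Nat) : Int) from by push_cast; ring]
  rw [pvFindFromSome s "</s>".toList (i + 6) ((i + 6) + m) (by omega) (by omega)]
  rw [Nat.add_sub_cancel_left]
  by_cases hB : PySem.Chars.find ((s.drop (i + 6)).take m) "</s>".toList = -1
  · rw [if_pos hB, if_pos rfl, pvCutANoSep _ hB]
    rw [PySem.List.slice_natCast, Nat.add_sub_cancel_left]
  · have h0B : 0 ≤ PySem.Chars.find ((s.drop (i + 6)).take m) "</s>".toList := by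
      have := PySem.Chars.neg_one_le_find ((s.drop (i + 6)).take m) "</s>".toList; omega
    have hBle := PySem.Chars.find_le_length ((s.drop (i + 6)).take m) "</s>".toList
    obtain ⟨r, hr⟩ := Int.eq_ofNat_of_zero_le h0B
    have hrm : r ≤ m := by
      rw [hr, hql] at hBle; exact_mod_cast hBle
    rw [hr]
    rw [if_neg (show ¬((r : Int) = -1) from by omega)]
    rw [if_neg (show ¬(((i + 6 : Nat) : Int) + (r : Int) = -1) from by omega)]
    rw [pvCutASep _ hB, hr, Int.toNat_natCast]
    rw [show ((i + 6 : Nat) : Int) + (r : Int) = (((i + 6) + r : Nat) : Int) from by push_cast; ring]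
    rw [PySem.List.slice_natCast, Nat.add_sub_cancel_left, List.take_take,
      Nat.min_eq_left hrm]

lemma pvBloopEq (s : List Char) (i : Nat) (hocc : "<mask>".toList <+: s.drop i) :
    bloopFills s i = (piecesF (s.drop (i + 6))).map cutA := by
  have hlen : i + 6 ≤ s.length := by
    have h1 := hocc.length_le
    simp only [List.length_drop, show ("<mask>".toList).length = 6 from by decide] at h1
    omega
  have hulen : (s.drop (i + 6)).length = s.length - (i + 6) := by simp
  have hc6 : ((i : Int) + 6) = ((i + 6 : Nat) : Int) := by push_cast; ring
  rw [pvBloopStep, hc6, PySem.Chars.findFrom_natCast s "<mask>".toList (i + 6) hlen]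
  conv_rhs => rw [piecesF.eq_def]
  by_cases hA : PySem.Chars.find (s.drop (i + 6)) "<mask>".toList = -1
  · rw [if_pos hA, if_pos rfl, dif_pos hA, pvFillNoMask s i hlen hA]
    rfl
  · have h0A : 0 ≤ PySem.Chars.find (s.drop (i + 6)) "<mask>".toList := by
      have := PySem.Chars.neg_one_le_find (s.drop (i + 6)) "<mask>".toList; omega
    obtain ⟨m, hm⟩ := Int.eq_ofNat_of_zero_le h0A
    have hocc' : "<mask>".toList <+: s.drop (i + 6 + m) := by
      have h1 := (PySem.Chars.find_spec h0A).1
      rw [hm, Int.toNat_natCast, List.drop_drop] at h1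
      exact h1
    have hm6 : (PySem.Chars.find (s.drop (i + 6)) "<mask>".toList).toNat + 6
        ≤ (s.drop (i + 6)).length := by
      have h1 := hocc'.length_le
      simp only [List.length_drop, show ("<mask>".toList).length = 6 from by decide] at h1
      rw [hm, Int.toNat_natCast]
      omega
    rw [dif_neg hA, pvFillMask s i hlen hA hm6, hm, Int.toNat_natCast]
    rw [if_neg (show ¬((m : Int) = -1) from by omega)]
    rw [if_neg (show ¬(((i + 6 : Nat) : Int) + (m : Int) = -1) from by omega)]
    rw [show ((i + 6 : Nat) : Int) + (m : Int) = (((i + 6) + m : Nat) : Int) from by push_cast; ring]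
    rw [Int.toNat_natCast]
    rw [pvBloopEq s ((i + 6) + m) hocc']
    rw [List.map_cons, List.drop_drop]
    rw [show i + 6 + m + 6 = i + 6 + (m + 6) from by omega]
termination_by s.length - i
decreasing_by
  omega

lemma pvPerText (t : List Char) :
    fillsA t
      = (if PySem.Chars.find t "<mask>".toList = -1 then []
         else bloopFills t (PySem.Chars.find t "<mask>".toList).toNat) := by
  show (PySem.List.slice (PySem.Chars.splitOn t "<mask>".toList) (some 1) none).foldl
      (fun fills p => fills ++ [cutA p]) [] = _
  rw [pvSplitOnEq, PySem.List.slice_from _ (by omega : (0 : Int) ≤ 1),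
    PySem.List.foldl_append_singleton_eq_map, List.nil_append]
  by_cases hf : PySem.Chars.find t "<mask>".toList = -1
  · rw [if_pos hf]
    rw [show (1 : Int).toNat = 1 from rfl]
    conv_lhs => rw [piecesF.eq_def]
    rw [dif_pos hf]
    rfl
  · have h0 : 0 ≤ PySem.Chars.find t "<mask>".toList := by
      have := PySem.Chars.neg_one_le_find t "<mask>".toList; omega
    obtain ⟨m, hm⟩ := Int.eq_ofNat_of_zero_le h0
    have hocc : "<mask>".toList <+: t.drop m := by
      have h1 := (PySem.Chars.find_spec h0).1
      rw [hm, Int.toNat_natCast] at h1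
      exact h1
    rw [if_neg hf, hm, Int.toNat_natCast]
    rw [show (1 : Int).toNat = 1 from rfl]
    conv_lhs => rw [piecesF.eq_def]
    rw [dif_neg hf, hm, Int.toNat_natCast]
    rw [List.drop_succ_cons, List.drop_zero]
    exact (pvBloopEq t m hocc).symm

theorem extract_fills_spec : Claim_equal_extract_fills := by
  intro texts _
  show extract_fills texts = extract_fills_alt texts
  show (texts.foldl (fun extracted txt => extracted ++ [fillsA txt.toList]) [])
      = texts.foldl (fun out txt => out ++
          [if PySem.Chars.find txt.toList "<mask>".toList = -1 then []
           else bloopFills txt.toList (PySem.Chars.find txt.toList "<mask>".toList).toNat]) []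
  rw [PySem.List.foldl_append_singleton_eq_map, PySem.List.foldl_append_singleton_eq_map,
    List.nil_append, List.nil_append]
  exact List.map_congr_left (fun t _ => pvPerText t.toList)
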